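-- pv_equiv track=rewrite | github.com/VadimOmel/GI_modified | q_Opti3.py | CUMSUMV
-- ===== SOURCE A (Python) =====
-- def CUMSUMV(vector, N):
--     n = len(vector)
--     if N<=n:
--         N = n
--     VcOutp = []
--     for j in range(n):
--         VcOutp.append(sum(vector[j:]))
--     for j in range(n+1,N+1):
--         VcOutp.append(0)
--     return VcOutp
-- ===== SOURCE B (Python) =====
-- def CUMSUMV(vector, N):
--     out = []
--     acc = 0
--     for x in reversed(vector):
--         acc += x
--         out.append(acc)
--     out.reverse()
--     out.extend([0] * max(0, N - len(vector)))
--     return out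
-- ===== Notes on version B (the rewrite author's own statement) =====
-- stated objective: faster
-- what changed: Replaced the per-index re-summation of each suffix (sum(vector[j:]) inside a loop) by a single reverse pass with a running accumulator, and the padding loop by list multiplication.
import Mathlib
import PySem

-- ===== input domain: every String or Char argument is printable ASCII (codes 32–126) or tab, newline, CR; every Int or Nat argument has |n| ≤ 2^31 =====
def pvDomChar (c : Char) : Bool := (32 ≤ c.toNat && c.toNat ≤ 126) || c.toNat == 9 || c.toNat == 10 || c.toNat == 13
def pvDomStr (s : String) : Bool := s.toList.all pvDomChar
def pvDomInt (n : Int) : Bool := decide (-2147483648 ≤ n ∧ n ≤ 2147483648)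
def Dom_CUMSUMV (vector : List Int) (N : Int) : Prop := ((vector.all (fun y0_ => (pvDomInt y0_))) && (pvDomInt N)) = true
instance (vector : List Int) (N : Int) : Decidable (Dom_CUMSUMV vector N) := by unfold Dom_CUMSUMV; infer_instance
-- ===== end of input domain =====

-- B replaces A's quadratic per-index re-summation of suffixes by one reverse pass
-- with a running accumulator (objective: faster, asymptotic O(n^2) -> O(n)).

-- ===== PORT A =====
-- literal transliteration of A: first loop appends sum(vector[j:]) for j in range(n),
-- second loop appends 0 for j in range(n+1, N'+1).
def CUMSUMV (vector : List Int) (N : Int) : List Int :=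
  let n : Int := vector.length
  let N' : Int := if N ≤ n then n else N
  let out1 : List Int :=
    (PySem.List.pyRange 0 n 1).foldl
      (fun acc j => acc ++ [(PySem.List.slice vector (some j) none).sum]) []
  (PySem.List.pyRange (n + 1) (N' + 1) 1).foldl (fun acc _ => acc ++ [0]) out1

-- ===== PORT B =====
-- literal transliteration of B: fold over reversed vector carrying (acc, out),
-- reverse out, then extend with max(0, N - len) zeros.
def CUMSUMV_alt (vector : List Int) (N : Int) : List Int :=
  let p : Int × List Int :=
    vector.reverse.foldl (fun s x => (s.1 + x, s.2 ++ [s.1 + x])) (0, [])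
  p.2.reverse ++ List.replicate (max 0 (N - vector.length)).toNat 0

-- ===== PRECONDITION & SPEC =====
def Spec_CUMSUMV (vector : List Int) (N : Int) (out : List Int) : Prop := out = CUMSUMV_alt vector N
instance (vector : List Int) (N : Int) (out : List Int) : Decidable (Spec_CUMSUMV vector N out) := by unfold Spec_CUMSUMV; infer_instance

-- ===== CLAIM (what is proved, stated in full; the proofs are below) =====
def Claim_equal_CUMSUMV : Prop := ∀ (vector : List Int) (N : Int), Dom_CUMSUMV vector N → Spec_CUMSUMV vector N (CUMSUMV vector N)

-- ===== LEMMAS AND PROOFS =====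

-- the suffix-sum list both programs compute
def suffSums (v : List Int) : List Int :=
  (List.range v.length).map (fun k => (v.drop k).sum)

theorem suffSums_cons (x : Int) (xs : List Int) :
    suffSums (x :: xs) = (x + xs.sum) :: suffSums xs := by
  simp [suffSums, List.range_succ_eq_map, List.map_map, Function.comp]

-- A's first loop produces exactly suffSums
theorem portA_first_loop (v : List Int) :
    (PySem.List.pyRange 0 (v.length : Int) 1).foldl
      (fun acc j => acc ++ [(PySem.List.slice v (some j) none).sum]) []
      = suffSums v := by
  rw [PySem.List.foldl_append_singleton_eq_map]
  rw [PySem.List.pyRange_one]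
  simp only [sub_zero, Int.toNat_natCast, List.map_map]
  unfold suffSums
  apply List.map_congr_left
  intro k _
  simp [PySem.List.slice_from_natCast]

-- B's fold: accumulator ends at the total sum, output is reversed suffSums
theorem portB_fold (v : List Int) :
    v.reverse.foldl (fun (s : Int × List Int) x => (s.1 + x, s.2 ++ [s.1 + x])) (0, [])
      = (v.sum, (suffSums v).reverse) := by
  induction v with
  | nil => simp [suffSums]
  | cons x xs ih =>
      rw [List.reverse_cons, List.foldl_append, ih]
      simp [suffSums_cons, add_comm]

-- appending a constant l.length times is appending a replicate
theorem foldl_append_zero (l : List Int) (init : List Int) :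
    l.foldl (fun acc _ => acc ++ [(0 : Int)]) init = init ++ List.replicate l.length 0 := by
  rw [show (fun (acc : List Int) (_ : Int) => acc ++ [(0 : Int)])
        = fun acc j => acc ++ [(fun _ => (0 : Int)) j] from rfl]
  rw [PySem.List.foldl_append_singleton_eq_map]
  simp [List.map_const']

-- ===== VERDICT (by name: the statement is the Claim_ definition above) =====
theorem CUMSUMV_spec : Claim_equal_CUMSUMV := by
  intro v N _
  unfold Spec_CUMSUMV CUMSUMV CUMSUMV_alt
  simp only [portA_first_loop, portB_fold, foldl_append_zero,
    PySem.List.length_pyRange_one]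
  congr 1
  · simp
  · congr 1
    split_ifs with h
    · omega
    · omega
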